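-- pv_equiv track=rewrite | github.com/maoluois/pythonProject | alg/lesson_11/main.3.py | find
-- ===== SOURCE A (Python) =====
-- def find(L):
--     for i in L:  # 只有使用权  如果用下标可以改变值
--         temp = i
--         flag = 0
--         for j in range(4):
--             temp += 1
--
--             if temp in L:
--
--                 continue
--
--
--
--
--             else:
--                 flag = 1
--                 break
--
--         if flag == 0:
--             return True
--
--     return False
-- ===== SOURCE B (Python) =====
-- def find(L):
--     S = set(L)
--     for v in S:
--         if v - 1 in S:
--             continue  # not the start of a run
--         cur, n = v, 0
--         while n < 5 and cur in S:
--             n += 1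
--             cur += 1
--         if n >= 5:
--             return True
--     return False
-- ===== Notes on version B (the rewrite author's own statement) =====
-- stated objective: faster
-- what changed: B builds a set once and walks only from run starts (values v with v-1 absent), stepping by +1 through set membership capped at 5, instead of A's nested list-membership scan from every element.
import Mathlib
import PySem

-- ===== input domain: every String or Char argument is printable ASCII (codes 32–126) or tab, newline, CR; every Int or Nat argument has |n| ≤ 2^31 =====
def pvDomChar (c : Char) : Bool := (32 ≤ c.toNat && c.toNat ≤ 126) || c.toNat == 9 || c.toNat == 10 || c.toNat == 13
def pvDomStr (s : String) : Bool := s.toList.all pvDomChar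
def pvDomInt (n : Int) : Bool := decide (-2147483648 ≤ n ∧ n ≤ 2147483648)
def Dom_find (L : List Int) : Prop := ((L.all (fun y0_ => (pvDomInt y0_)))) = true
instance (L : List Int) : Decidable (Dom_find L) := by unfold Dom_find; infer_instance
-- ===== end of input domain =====

-- B replaces A's quadratic scan (membership test in the list from every element) by a
-- set built once and a +1 walk started only at run starts (v with v-1 absent), capped at 5.

-- ===== PORT A =====
-- inner loop 'for j in range(4)': fuel = remaining iterations; returns the final flag
def findInner (L : List Int) : Nat → Int → Int
  | 0, _ => 0
  | k + 1, temp =>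
      let t := temp + 1
      if L.contains t then findInner L k t else 1

def findGo (L : List Int) : List Int → Bool
  | [] => false
  | i :: rest => if findInner L 4 i = 0 then true else findGo L rest

def find (L : List Int) : Bool := findGo L L

-- ===== PORT B =====
-- 'while n < 5 and cur in S': fuel = 5 - n (the loop guard n < 5 is exactly fuel > 0); returns n
def walkB (S : List Int) : Nat → Int → Nat → Nat
  | 0, _, n => n
  | f + 1, cur, n => if S.contains cur then walkB S f (cur + 1) (n + 1) else n

def altGo (S : List Int) : List Int → Bool
  | [] => false
  | v :: rest =>
      if S.contains (v - 1) then altGo S rest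
      else if 5 ≤ walkB S 5 v 0 then true else altGo S rest

def find_alt (L : List Int) : Bool :=
  let S : PySem.Set Int := PySem.Set.ofList L
  altGo S S

-- ===== PRECONDITION & SPEC =====
def Spec_find (L : List Int) (out : Bool) : Prop := out = find_alt L
instance (L : List Int) (out : Bool) : Decidable (Spec_find L out) := by unfold Spec_find; infer_instance

-- ===== CLAIM (what is proved, stated in full; the proofs are below) =====
def Claim_equal_find : Prop := ∀ (L : List Int), Dom_find L → Spec_find L (find L)

-- ===== LEMMAS AND PROOFS =====

theorem findInner_eq_zero (L : List Int) (i : Int) :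
    findInner L 4 i = 0 ↔
      (i + 1) ∈ L ∧ (i + 2) ∈ L ∧ (i + 3) ∈ L ∧ (i + 4) ∈ L := by
  have e2 : i + 1 + 1 = i + 2 := by ring
  have e3 : i + 2 + 1 = i + 3 := by ring
  have e4 : i + 3 + 1 = i + 4 := by ring
  simp only [findInner, e2, e3, e4]
  split_ifs with h1 h2 h3 h4 <;>
    simp_all

theorem findGo_iff (L M : List Int) :
    findGo L M = true ↔ ∃ i ∈ M, findInner L 4 i = 0 := by
  induction M with
  | nil => simp [findGo]
  | cons a t ih =>
      simp only [findGo]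
      split_ifs with h <;> simp [h, ih]

theorem find_iff (L : List Int) :
    find L = true ↔ ∃ i ∈ L, (i + 1) ∈ L ∧ (i + 2) ∈ L ∧ (i + 3) ∈ L ∧ (i + 4) ∈ L := by
  simp only [find, findGo_iff, findInner_eq_zero]

theorem walkB_iff (S : List Int) (v : Int) :
    5 ≤ walkB S 5 v 0 ↔
      v ∈ S ∧ (v + 1) ∈ S ∧ (v + 2) ∈ S ∧ (v + 3) ∈ S ∧ (v + 4) ∈ S := by
  have e2 : v + 1 + 1 = v + 2 := by ring
  have e3 : v + 2 + 1 = v + 3 := by ring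
  have e4 : v + 3 + 1 = v + 4 := by ring
  simp only [walkB, e2, e3, e4]
  split_ifs with h1 h2 h3 h4 h5 <;>
    simp_all

theorem altGo_iff (S M : List Int) :
    altGo S M = true ↔ ∃ v ∈ M, (v - 1) ∉ S ∧ 5 ≤ walkB S 5 v 0 := by
  induction M with
  | nil => simp [altGo]
  | cons a t ih =>
      simp only [altGo]
      split_ifs with h h' <;>
        simp_all

theorem find_alt_iff (L : List Int) :
    find_alt L = true ↔
      ∃ v ∈ L, (v - 1) ∉ L ∧ v ∈ L ∧ (v + 1) ∈ L ∧ (v + 2) ∈ L ∧ (v + 3) ∈ L ∧ (v + 4) ∈ L := by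
  simp only [find_alt, altGo_iff, walkB_iff, PySem.Set.mem_ofList]

/-- From any i ∈ L we can back off to a run start v ≤ i with v-1 ∉ L and the whole
segment v..i inside L. -/
theorem exists_run_start (L : List Int) (i : Int) (hi : i ∈ L) :
    ∃ v : Int, v ≤ i ∧ (v - 1) ∉ L ∧ ∀ k : Int, 0 ≤ k → v + k ≤ i → v + k ∈ L := by
  have hex : ∃ n : Nat, i - ((n : Int) + 1) ∉ L := by
    by_contra hall
    push Not at hall
    have hnodup : ((List.range (L.length + 1)).map (fun k : Nat => i - ((k : Int) + 1))).Nodup := by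
      refine List.Nodup.map ?_ (List.nodup_range)
      intro a b hab
      simp only at hab
      omega
    have hsub : ((List.range (L.length + 1)).map (fun k : Nat => i - ((k : Int) + 1))) ⊆ L := by
      intro x hx
      simp only [List.mem_map, List.mem_range] at hx
      obtain ⟨k, -, rfl⟩ := hx
      exact hall k
    have hlen := (hnodup.subperm hsub).length_le
    simp at hlen
  classical
  set n := Nat.find hex with hn
  refine ⟨i - n, by omega, ?_, ?_⟩
  · have := Nat.find_spec hex
    have : i - ((n : Int) + 1) ∉ L := this
    have e : i - (n : Int) - 1 = i - ((n : Int) + 1) := by ring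
    rw [e]; exact this
  · intro k hk hki
    -- i - n + k = i - (n - k); k ≤ n because i - n + k ≤ i
    have hkn : k ≤ (n : Int) := by omega
    rcases eq_or_lt_of_le hkn with heq | hlt
    · have : i - (n : Int) + k = i := by omega
      rw [this]; exact hi
    · -- m := n - k.toNat - 1 < n, so i - (m+1) ∈ L and m+1 = n - k
      have hk' : (k.toNat : Int) = k := Int.toNat_of_nonneg hk
      have hm : n - k.toNat - 1 < n := by omega
      have hmem : ¬ i - (((n - k.toNat - 1 : Nat) : Int) + 1) ∉ L := Nat.find_min hex hm
      push Not at hmem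
      have e : i - (((n - k.toNat - 1 : Nat) : Int) + 1) = i - (n : Int) + k := by
        omega
      rwa [e] at hmem

theorem find_eq_alt (L : List Int) : find L = find_alt L := by
  rw [Bool.eq_iff_iff, find_iff, find_alt_iff]
  constructor
  · rintro ⟨i, hi, h1, h2, h3, h4⟩
    obtain ⟨v, hvi, hv1, hseg⟩ := exists_run_start L i hi
    have hmem : ∀ j : Int, 0 ≤ j → j ≤ 4 → v + j ∈ L := by
      intro j hj0 hj4
      by_cases hle : v + j ≤ i
      · exact hseg j hj0 hle
      · -- i < v + j ≤ v + 4 ≤ i + 4, so v + j = i + t with 1 ≤ t ≤ 4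
        obtain ⟨t, ht, h1t, h4t⟩ : ∃ t, v + j = i + t ∧ 1 ≤ t ∧ t ≤ 4 :=
          ⟨v + j - i, by ring, by omega, by omega⟩
        rw [ht]
        interval_cases t <;> assumption
    refine ⟨v, ?_, hv1, ?_, ?_, ?_, ?_, ?_⟩
    · have := hmem 0 le_rfl (by norm_num); simpa using this
    · have := hmem 0 le_rfl (by norm_num); simpa using this
    · have := hmem 1 (by norm_num) (by norm_num); simpa using this
    · have := hmem 2 (by norm_num) (by norm_num); simpa using this
    · have := hmem 3 (by norm_num) (by norm_num); simpa using this
    · have := hmem 4 (by norm_num) (by norm_num); simpa using this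
  · rintro ⟨v, hv, -, -, h1, h2, h3, h4⟩
    exact ⟨v, hv, h1, h2, h3, h4⟩

-- ===== VERDICT (by name: the statement is the Claim_ definition above) =====
theorem find_spec : Claim_equal_find := by
  intro L _
  unfold Spec_find
  exact find_eq_alt L
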